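-- pv_equiv track=rewrite | github.com/akhil21/pyProject | util/clique_cover_extension.py | get_most_complex_pauli_label
-- ===== SOURCE A (Python) =====
-- def get_most_complex_pauli_label(paulis):
--     n = len(paulis[0])
--     pauli_set = {}
--     for pauli in paulis:
--         for qubit, pauli_qubit in enumerate(pauli):
--             if pauli_set.get(qubit) is None:
--                 if pauli_qubit is not "I":
--                     pauli_set[qubit] = pauli_qubit
--     pauli_product = ""
--     for qubit in range(n):
--         if pauli_set.get(qubit) is None:
--             pauli_product += "I"
--         else:
--             pauli_product += pauli_set[qubit]
--     return pauli_product
-- ===== SOURCE B (Python) =====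
-- def get_most_complex_pauli_label(paulis):
--     n = len(paulis[0])
--     return ''.join(
--         next((p[q] for p in paulis if q < len(p) and p[q] != 'I'), 'I')
--         for q in range(n)
--     )
-- ===== Notes on version B (the rewrite author's own statement) =====
-- stated objective: simpler
-- what changed: Replaces the row-by-row loop maintaining a dict of first non-I characters with a direct column-by-column scan that short-circuits at the first non-I character per column and joins the results.
-- outside the precondition, e.g. on get_most_complex_pauli_label([]): A raises IndexError, B raises IndexError
import Mathlib
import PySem

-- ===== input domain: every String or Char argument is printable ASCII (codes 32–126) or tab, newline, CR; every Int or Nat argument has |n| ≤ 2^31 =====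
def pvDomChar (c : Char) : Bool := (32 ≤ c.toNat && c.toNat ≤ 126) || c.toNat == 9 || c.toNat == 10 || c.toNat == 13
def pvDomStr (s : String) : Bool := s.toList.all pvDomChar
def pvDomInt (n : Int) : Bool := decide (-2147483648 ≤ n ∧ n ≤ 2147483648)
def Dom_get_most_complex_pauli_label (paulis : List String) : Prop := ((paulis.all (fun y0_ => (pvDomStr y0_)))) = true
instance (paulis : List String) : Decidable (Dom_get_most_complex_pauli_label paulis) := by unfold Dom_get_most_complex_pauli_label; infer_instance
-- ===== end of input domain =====

-- B changes the decomposition: a direct column-by-column scan with short-circuit instead of a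
-- row-by-row loop maintaining a dict of first non-I characters; return values agree everywhere A returns.

-- ===== PORT A =====
-- one step of the inner 'for qubit, pauli_qubit in enumerate(pauli)' loop body
def pvAStep (d : PySem.Dict Int Char) (qc : Int × Char) : PySem.Dict Int Char :=
  if (d.get? qc.1).isNone then
    (if qc.2 ≠ 'I' then d.insert qc.1 qc.2 else d)
  else d

def get_most_complex_pauli_label (paulis : List String) : String :=
  match paulis with
  | [] => ""   -- Python raises IndexError on paulis[0]; excluded by Pre_
  | p0 :: _ =>
    let n : Int := (p0.toList.length : Int)
    let pset : PySem.Dict Int Char :=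
      paulis.foldl (fun d pauli => (PySem.List.enumerate pauli.toList 0).foldl pvAStep d)
        PySem.Dict.empty
    (PySem.List.pyRange 0 n 1).foldl
      (fun s q =>
        if (pset.get? q).isNone then s.push 'I'
        else s.push ((pset.get? q).getD 'I')) ""

-- ===== PORT B =====
-- 'next((p[q] for p in paulis if q < len(p) and p[q] != 'I'), 'I')'
def pvColFirst (paulis : List String) (q : Nat) : Option Char :=
  paulis.findSome? (fun p => (p.toList[q]?).bind (fun c => if c ≠ 'I' then some c else none))

def get_most_complex_pauli_label_alt (paulis : List String) : String :=
  match paulis with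
  | [] => ""   -- Python raises IndexError on paulis[0]; excluded by Pre_
  | p0 :: _ =>
    String.ofList ((List.range p0.toList.length).map (fun q => (pvColFirst paulis q).getD 'I'))

-- ===== PRECONDITION & SPEC =====
-- A (and B) raise IndexError on the empty list (paulis[0]); Pre_ excludes exactly that input.
def Pre_get_most_complex_pauli_label (paulis : List String) : Prop := paulis ≠ []
instance (paulis : List String) : Decidable (Pre_get_most_complex_pauli_label paulis) := by
  unfold Pre_get_most_complex_pauli_label; infer_instance
def pvWitness_get_most_complex_pauli_label : List String := ["IXI", "ZYZ"]

def Spec_get_most_complex_pauli_label (paulis : List String) (out : String) : Prop :=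
  out = get_most_complex_pauli_label_alt paulis
instance (paulis : List String) (out : String) : Decidable (Spec_get_most_complex_pauli_label paulis out) := by
  unfold Spec_get_most_complex_pauli_label; infer_instance

-- ===== CLAIM (what is proved, stated in full; the proofs are below) =====
def Claim_equal_get_most_complex_pauli_label : Prop :=
  ∀ (paulis : List String), Dom_get_most_complex_pauli_label paulis →
    Pre_get_most_complex_pauli_label paulis →
    Spec_get_most_complex_pauli_label paulis (get_most_complex_pauli_label paulis)

-- ===== LEMMAS AND PROOFS =====

-- first non-I character of one row at column j (the body of B's generator, on one row)
def pvProbe (l : List Char) (j : Nat) : Option Char :=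
  l[j]?.bind (fun c => if c ≠ 'I' then some c else none)

lemma pvAStep_get_other (d : PySem.Dict Int Char) (qc : Int × Char) (k : Int) (h : k ≠ qc.1) :
    (pvAStep d qc).get? k = d.get? k := by
  unfold pvAStep
  split_ifs with h1 h2 <;> try rfl
  exact PySem.Dict.get?_insert_of_ne d qc.2 h

lemma pv_inner_get (l : List Char) (t : Nat) (d : PySem.Dict Int Char) (q : Nat) :
    ((PySem.List.enumerate l (t : Int)).foldl pvAStep d).get? (q : Int) =
      (d.get? (q : Int)).or (if t ≤ q then pvProbe l (q - t) else none) := by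
  induction l generalizing t d with
  | nil => simp [PySem.List.enumerate_nil, pvProbe]
  | cons x xs ih =>
    rw [PySem.List.enumerate_cons]
    have hcast : (t : Int) + 1 = ((t + 1 : Nat) : Int) := by push_cast; ring
    rw [List.foldl_cons, hcast, ih (t + 1) (pvAStep d ((t : Int), x))]
    rcases lt_trichotomy q t with hlt | heq | hgt
    · have h1 : ¬ t ≤ q := by omega
      have h2 : ¬ t + 1 ≤ q := by omega
      rw [pvAStep_get_other d _ _ (by show (q : Int) ≠ (t : Int); exact_mod_cast (by omega : q ≠ t))]
      simp [h1, h2]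
    · subst heq
      have h2 : ¬ q + 1 ≤ q := by omega
      rw [if_neg h2, if_pos (le_refl q), Nat.sub_self]
      unfold pvAStep
      simp only []
      rcases hd : d.get? (q : Int) with _ | v
      · simp only [Option.isNone_none, if_pos]
        by_cases hx : x ≠ 'I'
        · simp [hx, PySem.Dict.get?_insert_self, pvProbe]
        · simp only [ne_eq, not_not] at hx
          simp [hx, hd, pvProbe]
      · simp [hd, pvProbe]
    · have h1 : t ≤ q := by omega
      have h2 : t + 1 ≤ q := by omega
      rw [pvAStep_get_other d _ _ (by show (q : Int) ≠ (t : Int); exact_mod_cast (by omega : q ≠ t))]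
      have hidx : q - t = (q - (t + 1)) + 1 := by omega
      have : pvProbe (x :: xs) (q - t) = pvProbe xs (q - (t + 1)) := by
        rw [hidx]; simp [pvProbe]
      simp [h1, h2, this]

lemma pv_or_findSome {α β : Type} (f : α → Option β) (x : α) (l : List α) :
    (f x).or (l.findSome? f) = ((x :: l).findSome? f) := by
  rw [List.findSome?_cons]
  cases f x <;> rfl

lemma pv_outer_get (rows : List String) (d : PySem.Dict Int Char) (q : Nat) :
    ((rows.foldl (fun d pauli => (PySem.List.enumerate pauli.toList 0).foldl pvAStep d) d).get? (q : Int)) =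
      (d.get? (q : Int)).or (pvColFirst rows q) := by
  induction rows generalizing d with
  | nil => simp [pvColFirst]
  | cons p rows ih =>
    rw [List.foldl_cons, ih]
    rw [show (0 : Int) = ((0 : Nat) : Int) from rfl, pv_inner_get p.toList 0 d q]
    rw [if_pos (Nat.zero_le q), Nat.sub_zero, Option.or_assoc]
    congr 1
    exact pv_or_findSome
      (fun p : String => p.toList[q]?.bind (fun c => if c ≠ 'I' then some c else none)) p rows

lemma pv_push_fold (g : Nat → Char) (n : Nat) (s : String) :
    ((List.range n).foldl (fun s q => s.push (g q)) s).toList = s.toList ++ (List.range n).map g := by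
  induction n with
  | zero => simp
  | succ n ih =>
    rw [List.range_succ, List.foldl_append, List.map_append]
    simp [ih]

-- ===== VERDICT (by name: the statement is the Claim_ definition above) =====
theorem get_most_complex_pauli_label_spec : Claim_equal_get_most_complex_pauli_label := by
  intro paulis _ hpre
  unfold Spec_get_most_complex_pauli_label get_most_complex_pauli_label get_most_complex_pauli_label_alt
  match paulis with
  | [] => exact absurd rfl hpre
  | p0 :: rest =>
    simp only []
    set rows := p0 :: rest with hrows
    have hget : ∀ q : Nat,
        ((rows.foldl (fun d pauli => (PySem.List.enumerate pauli.toList 0).foldl pvAStep d)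
          PySem.Dict.empty).get? (q : Int)) = pvColFirst rows q := by
      intro q; rw [pv_outer_get]; simp
    rw [PySem.List.pyRange_one]
    simp only [Int.sub_zero, Int.toNat_natCast, List.foldl_map]
    have hstep : ∀ (s : String) (q : Nat),
        (fun (s : String) (q : Int) =>
          if ((rows.foldl (fun d pauli => (PySem.List.enumerate pauli.toList 0).foldl pvAStep d)
            PySem.Dict.empty).get? q).isNone then s.push 'I'
          else s.push (((rows.foldl (fun d pauli => (PySem.List.enumerate pauli.toList 0).foldl pvAStep d)
            PySem.Dict.empty).get? q).getD 'I')) s ((0 : Int) + q) =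
          s.push ((pvColFirst rows q).getD 'I') := by
      intro s q
      simp only [Int.zero_add, hget q]
      rcases pvColFirst rows q with _ | c <;> simp
    calc (List.range p0.toList.length).foldl
          (fun (s : String) (q : Nat) =>
            (fun (s : String) (q : Int) =>
              if ((rows.foldl (fun d pauli => (PySem.List.enumerate pauli.toList 0).foldl pvAStep d)
                PySem.Dict.empty).get? q).isNone then s.push 'I'
              else s.push (((rows.foldl (fun d pauli => (PySem.List.enumerate pauli.toList 0).foldl pvAStep d)
                PySem.Dict.empty).get? q).getD 'I')) s ((0 : Int) + q)) ""
        = (List.range p0.toList.length).foldl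
            (fun s q => s.push ((pvColFirst rows q).getD 'I')) "" := by
          apply PySem.List.foldl_congr_mem
          intro s q _
          exact hstep s q
      _ = String.ofList ((List.range p0.toList.length).map (fun q => (pvColFirst rows q).getD 'I')) := by
          apply String.toList_inj.mp
          rw [pv_push_fold]; simp
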